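-- pv_equiv track=rewrite | github.com/XinnuoXu/Highlight_based_Summarization | Highlight_evaluation/build_human_eva.py | eva_highlight_v1
-- ===== SOURCE A (Python) =====
-- def label_classify(item):
--     if item[0] == '(':
--         if item[1] == 'F':
--             return "fact"
--         else:
--             return "phrase"
--     elif item[0] == ')':
--         return "end"
--     elif item[0] == '*':
--         return "reference"
--     return "token"
--
-- def eva_highlight_v1(line):
--     tokens = [[] for i in enumerate(line)]; names = []
--     fact_name_stack = []
--     id_stack = []
--     type_stack = []
--     only_tokens = []
--     for i, item in enumerate(line):
--         l_type = label_classify(item)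
--         if l_type in ["fact", "phrase"]:
--             tokens[i].append("<strong>")
--             id_stack.append(i)
--             type_stack.append(l_type)
--             if l_type == "fact":
--                 fact_name_stack.append(item[1:])
--                 names.append(item[1:])
--             else:
--                 names.append(fact_name_stack[-1] + "|||" + item[1:])
--         elif l_type == "end":
--             pop_id = id_stack.pop()
--             tokens[pop_id].append("</strong>")
--             pop_type = type_stack.pop()
--             if pop_type == "fact":
--                 fact_name_stack.pop()
--             names.append("")
--         else:
--             if l_type == "reference":
--                 names.append("")
--             else:
--                 for j in range(len(tokens)):
--                     tokens[j].append(item)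
--                 names.append("")
--                 only_tokens.append(item)
--
--     ret_list = []; ret_name = []
--     for i, item in enumerate(tokens):
--         if names[i] != "":
--             ret_list.append(item)
--             ret_name.append(names[i])
--     return ret_list, ret_name, only_tokens
-- ===== SOURCE B (Python) =====
-- # B: maintain lists only for span-open (kept) positions, sharing one token stream prefix;
-- # O((S+1)*T) where S = number of spans, instead of A's O(n*T) over all n positions.
-- def eva_highlight_v1(line):
--     ret_list = []       # one list per opened span, in opening order
--     ret_name = []
--     only_tokens = []
--     fact_names = []
--     open_stack = []     # (index into ret_list, is_fact) for spans still open
--     for item in line: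
--         if item[0] == '(':
--             idx = len(ret_list)
--             ret_list.append(only_tokens + ["<strong>"])
--             if item[1] == 'F':
--                 fact_names.append(item[1:])
--                 ret_name.append(item[1:])
--                 open_stack.append((idx, True))
--             else:
--                 ret_name.append(fact_names[-1] + "|||" + item[1:])
--                 open_stack.append((idx, False))
--         elif item[0] == ')':
--             idx, is_fact = open_stack.pop()
--             ret_list[idx].append("</strong>")
--             if is_fact:
--                 fact_names.pop()
--         elif item[0] == '*':
--             pass
--         else:
--             for lst in ret_list:
--                 lst.append(item)
--             only_tokens.append(item)
--     return ret_list, ret_name, only_tokens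
-- ===== Notes on version B (the rewrite author's own statement) =====
-- stated objective: faster
-- what changed: A keeps one list per input position and appends every plain token to all n position lists, then filters by non-empty name; B maintains lists only for the span-opening (kept) positions, seeding each new span list from the shared plain-token prefix, so plain tokens are appended only to the S span lists.
import Mathlib
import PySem

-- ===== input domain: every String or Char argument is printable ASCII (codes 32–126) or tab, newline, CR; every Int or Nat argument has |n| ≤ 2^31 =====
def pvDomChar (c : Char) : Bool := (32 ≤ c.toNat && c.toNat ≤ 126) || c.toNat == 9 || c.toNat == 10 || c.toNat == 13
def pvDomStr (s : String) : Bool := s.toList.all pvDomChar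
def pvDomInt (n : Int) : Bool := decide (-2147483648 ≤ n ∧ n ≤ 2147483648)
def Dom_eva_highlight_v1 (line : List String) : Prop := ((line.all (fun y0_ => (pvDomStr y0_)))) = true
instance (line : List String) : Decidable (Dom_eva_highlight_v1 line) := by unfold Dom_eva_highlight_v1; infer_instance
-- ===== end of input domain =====

-- B maintains lists only for the span-opening (kept) positions over one shared plain-token
-- stream, instead of A's per-position lists that every plain token is appended to.
-- Equivalence is about the RETURN value; neither program mutates its argument.

-- ===== PORT A =====
def labelClassify (item : String) : String :=
  if PySem.Str.pyGet? item 0 = some '(' then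
    if PySem.Str.pyGet? item 1 = some 'F' then "fact" else "phrase"
  else if PySem.Str.pyGet? item 0 = some ')' then "end"
  else if PySem.Str.pyGet? item 0 = some '*' then "reference"
  else "token"

structure StA where
  tokens : List (List String)
  names : List String
  facts : List String
  ids : List Nat
  types : List String
  only : List String

-- One loop iteration of A.  Python stacks (append/pop/[-1] at the right end) are
-- transliterated as Lean lists pushed/popped at the head.  The enumerate index i equals
-- names.length because names receives exactly one element per iteration.
-- Python raises where a stack is empty / a string is too short (excluded by Pre_):
-- there headD supplies a default (st.tokens.length makes the modify a no-op).
def stepA (st : StA) (item : String) : StA :=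
  let i := st.names.length
  let lt := labelClassify item
  if lt = "fact" ∨ lt = "phrase" then
    let tokens' := st.tokens.modify i (fun l => l ++ ["<strong>"])
    if lt = "fact" then
      let nm := PySem.Str.slice item (some 1) none
      ⟨tokens', st.names ++ [nm], nm :: st.facts, i :: st.ids, lt :: st.types, st.only⟩
    else
      let nm := st.facts.headD "" ++ "|||" ++ PySem.Str.slice item (some 1) none
      ⟨tokens', st.names ++ [nm], st.facts, i :: st.ids, lt :: st.types, st.only⟩
  else if lt = "end" then
    let popId := st.ids.headD st.tokens.length
    let tokens' := st.tokens.modify popId (fun l => l ++ ["</strong>"])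
    let popType := st.types.headD ""
    ⟨tokens', st.names ++ [""], if popType = "fact" then st.facts.tail else st.facts,
      st.ids.tail, st.types.tail, st.only⟩
  else if lt = "reference" then
    ⟨st.tokens, st.names ++ [""], st.facts, st.ids, st.types, st.only⟩
  else
    ⟨st.tokens.map (fun l => l ++ [item]), st.names ++ [""], st.facts, st.ids, st.types,
      st.only ++ [item]⟩

def eva_highlight_v1 (line : List String) : List (List String) × List String × List String :=
  let st := line.foldl stepA ⟨List.replicate line.length [], [], [], [], [], []⟩
  let pr := (PySem.List.enumerate st.tokens).foldl
      (fun (acc : List (List String) × List String) p =>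
        if PySem.List.pyGetD st.names p.1 "" ≠ "" then
          (acc.1 ++ [p.2], acc.2 ++ [PySem.List.pyGetD st.names p.1 ""])
        else acc)
      ([], [])
  (pr.1, pr.2, st.only)

-- ===== PORT B =====
structure StB where
  ret : List (List String)
  rname : List String
  only : List String
  facts : List String
  opens : List (Nat × Bool)

-- One loop iteration of B: ret holds one list per opened span (in opening order);
-- opens is the stack of (index into ret, is_fact) of the spans still open.
def stepB (st : StB) (item : String) : StB :=
  if PySem.Str.pyGet? item 0 = some '(' then
    let lst := st.only ++ ["<strong>"]
    if PySem.Str.pyGet? item 1 = some 'F' then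
      let nm := PySem.Str.slice item (some 1) none
      ⟨st.ret ++ [lst], st.rname ++ [nm], st.only, nm :: st.facts, (st.ret.length, true) :: st.opens⟩
    else
      let nm := st.facts.headD "" ++ "|||" ++ PySem.Str.slice item (some 1) none
      ⟨st.ret ++ [lst], st.rname ++ [nm], st.only, st.facts, (st.ret.length, false) :: st.opens⟩
  else if PySem.Str.pyGet? item 0 = some ')' then
    let p := st.opens.headD (st.ret.length, false)
    ⟨st.ret.modify p.1 (fun l => l ++ ["</strong>"]), st.rname, st.only,
      if p.2 then st.facts.tail else st.facts, st.opens.tail⟩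
  else if PySem.Str.pyGet? item 0 = some '*' then st
  else ⟨st.ret.map (fun l => l ++ [item]), st.rname, st.only ++ [item], st.facts, st.opens⟩

def eva_highlight_v1_alt (line : List String) : List (List String) × List String × List String :=
  let st := line.foldl stepB ⟨[], [], [], [], []⟩
  (st.ret, st.rname, st.only)

-- ===== PRECONDITION & SPEC =====
def pvIsOpen (s : String) : Bool := PySem.Str.pyGet? s 0 == some '('
def pvIsClose (s : String) : Bool := PySem.Str.pyGet? s 0 == some ')'
def pvIsFact (s : String) : Bool := pvIsOpen s && PySem.Str.pyGet? s 1 == some 'F'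
def pvIsPhrase (s : String) : Bool := pvIsOpen s && !(PySem.Str.pyGet? s 1 == some 'F')
def pvBal (xs : List String) : Bool := xs.countP pvIsClose ≤ xs.countP pvIsOpen
def pvAlive (line : List String) (j i : Nat) : Bool :=
  (List.range i).all (fun k => !decide (j < k) || pvBal ((line.drop (j + 1)).take (k - j)))

-- Pre_ excludes exactly the inputs on which Python A raises: an empty token (item[0]),
-- a '('-token with no second character (item[1]), a prefix with more ')' than '(' tokens
-- (pop from an empty stack), and a phrase-open with no enclosing still-open fact
-- (fact_name_stack[-1] on an empty stack).  B raises on the very same inputs.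
def Pre_eva_highlight_v1 (line : List String) : Prop :=
  (∀ s ∈ line, s ≠ "") ∧
  (∀ s ∈ line, pvIsOpen s = true → (PySem.Str.pyGet? s 1).isSome = true) ∧
  (∀ k ∈ List.range (line.length + 1), pvBal (line.take k) = true) ∧
  (∀ i ∈ List.range line.length, pvIsPhrase (line.getD i "") = true →
      ∃ j ∈ List.range i, pvIsFact (line.getD j "") = true ∧ pvAlive line j i = true)

instance (line : List String) : Decidable (Pre_eva_highlight_v1 line) := by
  unfold Pre_eva_highlight_v1; infer_instance

def pvWitness_eva_highlight_v1 : List String := ["(Fa", "w", "(p", "x", ")", ")", "*r", "y"]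

def Spec_eva_highlight_v1 (line : List String) (out : List (List String) × List String × List String) : Prop := out = eva_highlight_v1_alt line
instance (line : List String) (out : List (List String) × List String × List String) : Decidable (Spec_eva_highlight_v1 line out) := by unfold Spec_eva_highlight_v1; infer_instance

-- ===== CLAIM (what is proved, stated in full; the proofs are below) =====
def Claim_equal_eva_highlight_v1 : Prop := ∀ (line : List String), Dom_eva_highlight_v1 line → Pre_eva_highlight_v1 line → Spec_eva_highlight_v1 line (eva_highlight_v1 line)

-- ===== LEMMAS AND PROOFS =====

-- getD facts used throughout
theorem pv_getD_append_lt {α : Type} (xs : List α) (x d : α) (j : Nat) (h : j < xs.length) :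
    (xs ++ [x]).getD j d = xs.getD j d := by
  simp [List.getD_eq_getElem?_getD, List.getElem?_append_left h]

theorem pv_getD_append_len {α : Type} (xs : List α) (x d : α) :
    (xs ++ [x]).getD xs.length d = x := by
  simp [List.getD_eq_getElem?_getD]

theorem pv_getD_modify_ne {α : Type} (xs : List α) (f : α → α) (d : α) (i j : Nat)
    (h : i ≠ j) : (xs.modify i f).getD j d = xs.getD j d := by
  simp [List.getD_eq_getElem?_getD, h]

theorem pv_getD_modify_self {α : Type} (xs : List α) (f : α → α) (d : α) (i : Nat)
    (h : i < xs.length) : (xs.modify i f).getD i d = f (xs.getD i d) := by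
  simp [List.getD_eq_getElem?_getD, List.getElem?_eq_getElem h]

theorem pv_getD_map {α : Type} (xs : List α) (f : α → α) (d : α) (j : Nat)
    (h : j < xs.length) : (xs.map f).getD j d = f (xs.getD j d) := by
  simp [List.getD_eq_getElem?_getD, List.getElem?_map, List.getElem?_eq_getElem h]

theorem pv_str_ne_empty (s : String) (h : s.toList ≠ []) : s ≠ "" := by
  intro he; subst he; simp at h

-- keepIdx nm = positions with a non-empty name; cntIdx nm id = how many such positions < id
def keepIdx (nm : List String) : List Nat :=
  (List.range nm.length).filter (fun j => nm.getD j "" ≠ "")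

def cntIdx (nm : List String) (id : Nat) : Nat :=
  ((List.range id).filter (fun j => nm.getD j "" ≠ "")).length

theorem keepIdx_append (nm : List String) (x : String) :
    keepIdx (nm ++ [x]) = keepIdx nm ++ if x ≠ "" then [nm.length] else [] := by
  unfold keepIdx
  have h1 : (nm ++ [x]).length = nm.length + 1 := by simp
  rw [h1, List.range_succ, List.filter_append]
  congr 1
  · exact List.filter_congr (fun j hj => by
      rw [pv_getD_append_lt _ _ _ _ (List.mem_range.mp hj)])
  · by_cases hx : x = "" <;> simp [List.filter, hx]

theorem cntIdx_append (nm : List String) (x : String) (id : Nat) (h : id ≤ nm.length) :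
    cntIdx (nm ++ [x]) id = cntIdx nm id := by
  unfold cntIdx
  congr 1
  exact List.filter_congr (fun j hj => by
    rw [pv_getD_append_lt _ _ _ _ (lt_of_lt_of_le (List.mem_range.mp hj) h)])

theorem keepIdx_mem {nm : List String} {j : Nat} (h : j ∈ keepIdx nm) :
    j < nm.length ∧ nm.getD j "" ≠ "" := by
  unfold keepIdx at h
  simp only [List.mem_filter, List.mem_range, decide_eq_true_eq] at h
  exact h

theorem keepIdx_nodup (nm : List String) : (keepIdx nm).Nodup :=
  List.Nodup.filter _ (List.nodup_range)

theorem keepIdx_length (nm : List String) : (keepIdx nm).length = cntIdx nm nm.length := rfl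

theorem keepIdx_getElem? (nm : List String) (id : Nat) (h1 : id < nm.length)
    (h2 : nm.getD id "" ≠ "") : (keepIdx nm)[cntIdx nm id]? = some id := by
  unfold keepIdx cntIdx
  have hsplit : nm.length = id + (nm.length - id) := by omega
  rw [hsplit, List.range_add, List.filter_append]
  rw [List.getElem?_append_right (le_refl _)]
  simp only [Nat.sub_self]
  have h3 : nm.length - id = (nm.length - id - 1) + 1 := by omega
  rw [h3, List.range_succ_eq_map, List.map_cons]
  simp only [Nat.add_zero]
  rw [List.filter_cons_of_pos (by simpa using h2)]
  rfl

theorem pv_map_modify (S : List Nat) (k id : Nat) (f : Nat → List String)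
    (g : List String → List String) (hnd : S.Nodup) (hk : S[k]? = some id) :
    (S.map f).modify k g = S.map (fun j => if j = id then g (f j) else f j) := by
  have hklt : k < S.length := (List.getElem?_eq_some_iff.mp hk).1
  apply List.ext_getElem?
  intro j
  rw [List.getElem?_modify]
  by_cases hj : k = j
  · subst hj
    simp [List.getElem?_map, hk]
  · simp only [List.getElem?_map]
    cases hS : S[j]? with
    | none => simp
    | some v =>
      have hv : v ≠ id := by
        intro hvid; subst hvid
        exact hj (List.getElem?_inj hklt hnd (hk.trans hS.symm))
      simp [hv, hj]

theorem pv_enumerate_append {α : Type} (xs : List α) (x : α) (s : Int) :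
    PySem.List.enumerate (xs ++ [x]) s = PySem.List.enumerate xs s ++ [((s + xs.length : Int), x)] := by
  induction xs generalizing s with
  | nil => simp [PySem.List.enumerate_nil, PySem.List.enumerate_cons]
  | cons a t ih =>
    simp only [List.cons_append, PySem.List.enumerate_cons, ih, List.length_cons]
    have harith : s + 1 + (t.length : Int) = s + ((t.length : Int) + 1) := by ring
    push_cast
    rw [harith]

-- A's final filtering loop, characterised through keepIdx
theorem pv_extract_pre (nms : List String) (toks : List (List String)) (h : toks.length ≤ nms.length) :
    (PySem.List.enumerate toks).foldl
      (fun (acc : List (List String) × List String) p =>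
        if PySem.List.pyGetD nms p.1 "" ≠ "" then
          (acc.1 ++ [p.2], acc.2 ++ [PySem.List.pyGetD nms p.1 ""])
        else acc)
      ([], [])
    = ((keepIdx (nms.take toks.length)).map (fun j => toks.getD j []),
        (nms.take toks.length).filter (fun s => s ≠ "")) := by
  induction toks using List.reverseRecOn with
  | nil => simp [PySem.List.enumerate_nil, keepIdx]
  | append_singleton toks t ih =>
    have hlt : toks.length < nms.length := by simp at h; omega
    rw [pv_enumerate_append, List.foldl_append, ih (le_of_lt hlt)]
    have htake : nms.take (toks.length + 1) = nms.take toks.length ++ [nms.getD toks.length ""] := by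
      rw [List.take_add_one, List.getElem?_eq_getElem hlt]
      simp [List.getD_eq_getElem?_getD, List.getElem?_eq_getElem hlt]
    have hlenpre : (nms.take toks.length).length = toks.length := by
      simp [List.length_take]; omega
    have hidx : PySem.List.pyGetD nms ((0 : Int) + toks.length) "" = nms.getD toks.length "" := by
      rw [zero_add, PySem.List.pyGetD_natCast]
    have hlen1 : (toks ++ [t]).length = toks.length + 1 := by simp
    rw [hlen1, htake]
    set x := nms.getD toks.length "" with hxdef
    by_cases hx : x = ""
    · rw [List.foldl_cons, List.foldl_nil, hidx, hx]
      rw [if_neg (by simp), keepIdx_append, if_neg (by simp), List.append_nil,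
        List.filter_append]
      refine congr_arg₂ _ ?_ ?_
      · exact (List.map_congr_left (fun j hj => by
          rw [pv_getD_append_lt _ _ _ _ (hlenpre ▸ (keepIdx_mem hj).1)])).symm
      · simp
    · rw [List.foldl_cons, List.foldl_nil, hidx, if_pos hx, keepIdx_append, if_pos hx,
        List.map_append, List.filter_append]
      refine congr_arg₂ _ (congr_arg₂ _ ?_ ?_) ?_
      · exact List.map_congr_left (fun j hj => by
          rw [pv_getD_append_lt _ _ _ _ (hlenpre ▸ (keepIdx_mem hj).1)])
      · rw [List.map_singleton, hlenpre, pv_getD_append_len]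
      · simp [hx]

theorem pv_extract (toks : List (List String)) (nms : List String) (h : nms.length = toks.length) :
    (PySem.List.enumerate toks).foldl
      (fun (acc : List (List String) × List String) p =>
        if PySem.List.pyGetD nms p.1 "" ≠ "" then
          (acc.1 ++ [p.2], acc.2 ++ [PySem.List.pyGetD nms p.1 ""])
        else acc)
      ([], [])
    = ((keepIdx nms).map (fun j => toks.getD j []), nms.filter (fun s => s ≠ "")) := by
  have hfull := pv_extract_pre nms toks (le_of_eq h.symm)
  rwa [← h, List.take_length] at hfull

-- Simulation relation between A's and B's loop states
def pvRel (a : StA) (b : StB) : Prop :=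
  b.only = a.only ∧
  b.facts = a.facts ∧
  b.rname = a.names.filter (fun s => s ≠ "") ∧
  b.ret = (keepIdx a.names).map (fun j => a.tokens.getD j []) ∧
  b.opens = (a.ids.zip a.types).map (fun p => (cntIdx a.names p.1, p.2 == "fact")) ∧
  a.ids.length = a.types.length ∧
  (∀ id ∈ a.ids, id < a.names.length ∧ a.names.getD id "" ≠ "") ∧
  (∀ j, a.names.length ≤ j → j < a.tokens.length → a.tokens.getD j [] = a.only) ∧
  a.names.length ≤ a.tokens.length

theorem pv_slice1_toList (item : String) :
    (PySem.Str.slice item (some 1) none).toList = item.toList.tail := by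
  simp only [PySem.Str.slice, PySem.Chars.slice_eq_listSlice, String.toList_ofList,
    PySem.List.slice_from_one]

theorem pv_slice1_ne (item : String) (hF : PySem.List.pyGet? item.toList 1 = some 'F') :
    PySem.Str.slice item (some 1) none ≠ "" := by
  apply pv_str_ne_empty
  rw [pv_slice1_toList]
  have h2 : 1 < item.toList.length := by
    by_contra hb
    simp only [not_lt] at hb
    unfold PySem.List.pyGet? PySem.List.pyIdx? at hF
    rw [if_pos (by omega : (0 : Int) ≤ 1),
      if_neg (show ¬((1 : Int) < (item.toList.length : Int)) by omega)] at hF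
    simp at hF
  apply List.ne_nil_of_length_pos
  rw [List.length_tail]
  omega

theorem pv_phrase_ne (x y : String) : x ++ "|||" ++ y ≠ "" := by
  apply pv_str_ne_empty
  rw [String.toList_append, String.toList_append]
  intro hc
  rcases List.append_eq_nil_iff.mp hc with ⟨h1, _⟩
  rcases List.append_eq_nil_iff.mp h1 with ⟨_, h2⟩
  exact (by decide : ("|||" : String).toList ≠ []) h2

theorem pv_step_rel (a : StA) (b : StB) (item : String) (hR : pvRel a b)
    (hlt : a.names.length < a.tokens.length) :
    pvRel (stepA a item) (stepB b item) ∧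
      (stepA a item).tokens.length = a.tokens.length ∧
      (stepA a item).names.length = a.names.length + 1 := by
  obtain ⟨hOnly, hFacts, hRname, hRet, hOpens, hLen, hIds, hFut, hLe⟩ := hR
  by_cases hO : PySem.List.pyGet? item.toList 0 = some '('
  · by_cases hF : PySem.List.pyGet? item.toList 1 = some 'F'
    · -- fact-open
      have hcl : labelClassify item = "fact" := by simp [labelClassify, hO, hF]
      have hnm : PySem.Str.slice item (some 1) none ≠ "" := pv_slice1_ne item hF
      have hstA : stepA a item =
          ⟨a.tokens.modify a.names.length (fun l => l ++ ["<strong>"]),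
            a.names ++ [PySem.Str.slice item (some 1) none],
            PySem.Str.slice item (some 1) none :: a.facts,
            a.names.length :: a.ids, "fact" :: a.types, a.only⟩ := by
        simp [stepA, hcl]
      have hstB : stepB b item =
          ⟨b.ret ++ [b.only ++ ["<strong>"]],
            b.rname ++ [PySem.Str.slice item (some 1) none],
            b.only, PySem.Str.slice item (some 1) none :: b.facts,
            (b.ret.length, true) :: b.opens⟩ := by
        simp [stepB, hO, hF]
      rw [hstA, hstB]
      refine ⟨?_, by simp, by simp⟩
      unfold pvRel
      dsimp only
      refine ⟨hOnly, by rw [hFacts], ?_, ?_, ?_, by simpa using hLen, ?_, ?_, ?_⟩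
      · rw [hRname, List.filter_append]
        simp [hnm]
      · rw [keepIdx_append, if_pos hnm, List.map_append, hRet]
        refine congr_arg₂ _ ?_ ?_
        · exact (List.map_congr_left (fun j hj => by
            rw [pv_getD_modify_ne _ _ _ _ _ (by have := (keepIdx_mem hj).1; omega)])).symm
        · rw [List.map_singleton, pv_getD_modify_self _ _ _ _ hlt,
            hFut a.names.length (le_refl _) hlt, hOnly]
      · rw [List.zip_cons_cons, List.map_cons, hOpens]
        refine congr_arg₂ _ ?_ ?_
        · refine congr_arg₂ _ ?_ rfl
          rw [cntIdx_append _ _ _ (le_refl _), ← keepIdx_length, hRet, List.length_map]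
        · exact (List.map_congr_left (fun p hp => by
            have hm := (hIds p.1 (List.of_mem_zip hp).1).1
            rw [cntIdx_append _ _ _ (by omega)])).symm
      · intro id hid
        rcases List.mem_cons.mp hid with h | h
        · subst h
          constructor
          · simp
          · rw [pv_getD_append_len]; exact hnm
        · have := hIds id h
          constructor
          · simp; omega
          · rw [pv_getD_append_lt _ _ _ _ this.1]; exact this.2
      · intro j h1 h2
        simp only [List.length_append, List.length_modify, List.length_cons,
          List.length_nil] at h1 h2 ⊢
        rw [pv_getD_modify_ne _ _ _ _ _ (by simp at h1; omega)]
        exact hFut j (by simp at h1; omega) h2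
      · simp; omega
    · -- phrase-open
      have hcl : labelClassify item = "phrase" := by simp [labelClassify, hO, hF]
      have hnm : a.facts.headD "" ++ "|||" ++ PySem.Str.slice item (some 1) none ≠ "" :=
        pv_phrase_ne _ _
      have hstA : stepA a item =
          ⟨a.tokens.modify a.names.length (fun l => l ++ ["<strong>"]),
            a.names ++ [a.facts.headD "" ++ "|||" ++ PySem.Str.slice item (some 1) none],
            a.facts, a.names.length :: a.ids, "phrase" :: a.types, a.only⟩ := by
        simp [stepA, hcl]
      have hstB : stepB b item =
          ⟨b.ret ++ [b.only ++ ["<strong>"]],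
            b.rname ++ [a.facts.headD "" ++ "|||" ++ PySem.Str.slice item (some 1) none],
            b.only, b.facts, (b.ret.length, false) :: b.opens⟩ := by
        simp [stepB, hO, hF, hFacts]
      rw [hstA, hstB]
      refine ⟨?_, by simp, by simp⟩
      unfold pvRel
      dsimp only
      refine ⟨hOnly, hFacts, ?_, ?_, ?_, by simpa using hLen, ?_, ?_, ?_⟩
      · rw [hRname, List.filter_append]
        simp
      · rw [keepIdx_append, if_pos hnm, List.map_append, hRet]
        refine congr_arg₂ _ ?_ ?_
        · exact (List.map_congr_left (fun j hj => by
            rw [pv_getD_modify_ne _ _ _ _ _ (by have := (keepIdx_mem hj).1; omega)])).symm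
        · rw [List.map_singleton, pv_getD_modify_self _ _ _ _ hlt,
            hFut a.names.length (le_refl _) hlt, hOnly]
      · rw [List.zip_cons_cons, List.map_cons, hOpens]
        refine congr_arg₂ _ ?_ ?_
        · refine congr_arg₂ _ ?_ rfl
          rw [cntIdx_append _ _ _ (le_refl _), ← keepIdx_length, hRet, List.length_map]
        · exact (List.map_congr_left (fun p hp => by
            have hm := (hIds p.1 (List.of_mem_zip hp).1).1
            rw [cntIdx_append _ _ _ (by omega)])).symm
      · intro id hid
        rcases List.mem_cons.mp hid with h | h
        · subst h
          constructor
          · simp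
          · rw [pv_getD_append_len]; exact hnm
        · have := hIds id h
          constructor
          · simp; omega
          · rw [pv_getD_append_lt _ _ _ _ this.1]; exact this.2
      · intro j h1 h2
        simp only [List.length_append, List.length_modify, List.length_cons,
          List.length_nil] at h1 h2 ⊢
        rw [pv_getD_modify_ne _ _ _ _ _ (by simp at h1; omega)]
        exact hFut j (by simp at h1; omega) h2
      · simp; omega
  · by_cases hC : PySem.List.pyGet? item.toList 0 = some ')'
    · -- close
      have hcl : labelClassify item = "end" := by simp [labelClassify, hC]
      cases hids : a.ids with
      | nil =>
        have htys : a.types = [] := by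
          rw [hids] at hLen
          exact List.length_eq_zero_iff.mp hLen.symm
        have hopens0 : b.opens = [] := by rw [hOpens, hids]; rfl
        have hstA : stepA a item =
            ⟨a.tokens, a.names ++ [""], a.facts, [], [], a.only⟩ := by
          simp [stepA, hcl, hids, htys, List.modify_eq_self (le_refl _)]
        have hstB : stepB b item = ⟨b.ret, b.rname, b.only, b.facts, []⟩ := by
          simp [stepB, hC, hopens0, List.modify_eq_self (le_refl _)]
        rw [hstA, hstB]
        refine ⟨?_, by simp, by simp⟩
        unfold pvRel
        dsimp only
        refine ⟨hOnly, hFacts, ?_, ?_, by simp, by simp, by simp, ?_, ?_⟩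
        · rw [hRname, List.filter_append]; simp
        · rw [keepIdx_append, if_neg (by simp), List.append_nil, hRet]
        · intro j h1 h2
          simp only [List.length_append, List.length_cons, List.length_nil] at h1
          exact hFut j (by omega) h2
        · simp; omega
      | cons id ids' =>
        cases htys : a.types with
        | nil =>
          exfalso
          rw [hids, htys] at hLen
          simp at hLen
        | cons t ts' =>
          have hIdm := hIds id (by rw [hids]; exact List.mem_cons_self ..)
          have hidlt : id < a.tokens.length := by omega
          have hopensc : b.opens = (cntIdx a.names id, t == "fact") ::
              (ids'.zip ts').map (fun p => (cntIdx a.names p.1, p.2 == "fact")) := by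
            rw [hOpens, hids, htys, List.zip_cons_cons, List.map_cons]
          have hstA : stepA a item =
              ⟨a.tokens.modify id (fun l => l ++ ["</strong>"]), a.names ++ [""],
                if t = "fact" then a.facts.tail else a.facts, ids', ts', a.only⟩ := by
            simp [stepA, hcl, hids, htys]
          have hstB : stepB b item =
              ⟨b.ret.modify (cntIdx a.names id) (fun l => l ++ ["</strong>"]), b.rname, b.only,
                if (t == "fact") then b.facts.tail else b.facts,
                (ids'.zip ts').map (fun p => (cntIdx a.names p.1, p.2 == "fact"))⟩ := by
            simp [stepB, hC, hopensc]
          rw [hstA, hstB]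
          refine ⟨?_, by simp, by simp⟩
          unfold pvRel
          dsimp only
          refine ⟨hOnly, ?_, ?_, ?_, ?_, ?_, ?_, ?_, ?_⟩
          · rcases eq_or_ne t "fact" with ht | ht
            · simp [ht, hFacts]
            · rw [if_neg (by simpa using ht), if_neg ht]
              exact hFacts
          · rw [hRname, List.filter_append]; simp
          · rw [hRet, pv_map_modify _ _ _ _ _ (keepIdx_nodup _)
              (keepIdx_getElem? a.names id hIdm.1 hIdm.2)]
            rw [keepIdx_append, if_neg (by simp), List.append_nil]
            refine List.map_congr_left (fun j hj => ?_)
            by_cases hji : j = id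
            · subst hji
              rw [if_pos rfl, pv_getD_modify_self _ _ _ _ hidlt]
            · rw [if_neg hji, pv_getD_modify_ne _ _ _ _ _ (fun h => hji h.symm)]
          · refine (List.map_congr_left (fun p hp => ?_)).symm
            have hm := (hIds p.1 (by rw [hids]; exact List.mem_cons_of_mem _ (List.of_mem_zip hp).1)).1
            rw [cntIdx_append _ _ _ (by omega)]
          · rw [hids, htys] at hLen; simpa using hLen
          · intro idx hidx
            have := hIds idx (by rw [hids]; exact List.mem_cons_of_mem _ hidx)
            constructor
            · simp; omega
            · rw [pv_getD_append_lt _ _ _ _ this.1]; exact this.2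
          · intro j h1 h2
            simp only [List.length_append, List.length_modify, List.length_cons,
              List.length_nil] at h1 h2 ⊢
            rw [pv_getD_modify_ne _ _ _ _ _ (by omega)]
            exact hFut j (by omega) h2
          · simp; omega
    · by_cases hS : PySem.List.pyGet? item.toList 0 = some '*'
      · -- reference
        have hcl : labelClassify item = "reference" := by simp [labelClassify, hS]
        have hstA : stepA a item =
            ⟨a.tokens, a.names ++ [""], a.facts, a.ids, a.types, a.only⟩ := by
          simp [stepA, hcl]
        have hstB : stepB b item = b := by
          simp [stepB, hS]
        rw [hstA, hstB]
        refine ⟨?_, by simp, by simp⟩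
        unfold pvRel
        dsimp only
        refine ⟨hOnly, hFacts, ?_, ?_, ?_, hLen, ?_, ?_, ?_⟩
        · rw [hRname, List.filter_append]; simp
        · rw [keepIdx_append, if_neg (by simp), List.append_nil, hRet]
        · rw [hOpens]
          refine (List.map_congr_left (fun p hp => ?_)).symm
          have hm := (hIds p.1 (List.of_mem_zip hp).1).1
          rw [cntIdx_append _ _ _ (by omega)]
        · intro id hid
          have := hIds id hid
          constructor
          · simp; omega
          · rw [pv_getD_append_lt _ _ _ _ this.1]; exact this.2
        · intro j h1 h2
          simp only [List.length_append, List.length_cons, List.length_nil] at h1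
          exact hFut j (by omega) h2
        · simp; omega
      · -- plain token
        have hcl : labelClassify item = "token" := by simp [labelClassify, hO, hC, hS]
        have hstA : stepA a item =
            ⟨a.tokens.map (fun l => l ++ [item]), a.names ++ [""], a.facts, a.ids, a.types,
              a.only ++ [item]⟩ := by
          simp [stepA, hcl]
        have hstB : stepB b item =
            ⟨b.ret.map (fun l => l ++ [item]), b.rname, b.only ++ [item], b.facts, b.opens⟩ := by
          simp [stepB, hO, hC, hS]
        rw [hstA, hstB]
        refine ⟨?_, by simp, by simp⟩
        unfold pvRel
        dsimp only
        refine ⟨by rw [hOnly], hFacts, ?_, ?_, ?_, hLen, ?_, ?_, ?_⟩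
        · rw [hRname, List.filter_append]; simp
        · rw [keepIdx_append, if_neg (by simp), List.append_nil, hRet, List.map_map]
          refine List.map_congr_left (fun j hj => ?_)
          have := (keepIdx_mem hj).1
          simp only [Function.comp]
          rw [pv_getD_map _ _ _ _ (by omega)]
        · rw [hOpens]
          refine (List.map_congr_left (fun p hp => ?_)).symm
          have hm := (hIds p.1 (List.of_mem_zip hp).1).1
          rw [cntIdx_append _ _ _ (by omega)]
        · intro id hid
          have := hIds id hid
          constructor
          · simp; omega
          · rw [pv_getD_append_lt _ _ _ _ this.1]; exact this.2
        · intro j h1 h2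
          simp only [List.length_append, List.length_map, List.length_cons,
            List.length_nil] at h1 h2 ⊢
          rw [pv_getD_map _ _ _ _ (by omega), hFut j (by omega) h2]
        · simp; omega

theorem pv_fold_rel (rest : List String) (a : StA) (b : StB) (hR : pvRel a b)
    (hlen : a.names.length + rest.length = a.tokens.length) :
    pvRel (rest.foldl stepA a) (rest.foldl stepB b) ∧
      (rest.foldl stepA a).tokens.length = a.tokens.length ∧
      (rest.foldl stepA a).names.length = a.names.length + rest.length := by
  induction rest generalizing a b with
  | nil => simpa using hR
  | cons x t ih =>
    have hstep := pv_step_rel a b x hR (by simp at hlen; omega)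
    obtain ⟨hR', hT', hN'⟩ := hstep
    have hrec := ih (stepA a x) (stepB b x) hR' (by simp at hlen ⊢; omega)
    simp only [List.foldl_cons]
    refine ⟨hrec.1, ?_, ?_⟩
    · rw [hrec.2.1, hT']
    · rw [hrec.2.2, hN']; simp at hlen ⊢; omega

theorem pv_total (line : List String) : eva_highlight_v1 line = eva_highlight_v1_alt line := by
  have h0 : pvRel ⟨List.replicate line.length [], [], [], [], [], []⟩
      (⟨[], [], [], [], []⟩ : StB) := by
    refine ⟨rfl, rfl, rfl, by simp [keepIdx], rfl, rfl, by simp, ?_, by simp⟩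
    intro j h1 h2
    simp only [List.length_replicate] at h2
    simp [List.getD_eq_getElem?_getD, h2]
  have hfold := pv_fold_rel line _ _ h0 (by simp)
  obtain ⟨hRel, hTokLen, hNmLen⟩ := hfold
  obtain ⟨hOnly, hFacts, hRname, hRet, hOpens, -, -, -, -⟩ := hRel
  have hlen : (line.foldl stepA ⟨List.replicate line.length [], [], [], [], [], []⟩).names.length
      = (line.foldl stepA ⟨List.replicate line.length [], [], [], [], [], []⟩).tokens.length := by
    rw [hTokLen, hNmLen]; simp
  unfold eva_highlight_v1 eva_highlight_v1_alt
  dsimp only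
  rw [pv_extract _ _ hlen]
  rw [← hRet, ← hRname, ← hOnly]

-- ===== VERDICT (by name: the statement is the Claim_ definition above) =====
theorem eva_highlight_v1_spec : Claim_equal_eva_highlight_v1 := by
  intro line _ _
  exact pv_total line
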